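-- pv_equiv track=rewrite | github.com/saanghyuk/data_science_python | algorithms/greedy_algorithm/late_fine.py | min_fee
-- ===== SOURCE A (Python) =====
-- def min_fee(pages_to_print):
--     # 코드를 작성하세요.
--     fine=0;
--     for i in range(len(pages_to_print)):
--         min_value = min(pages_to_print)
--         index = pages_to_print.index(min_value)
--         left_people = len(pages_to_print)
--         fine += int(min_value) * int(left_people)
--         pages_to_print.pop(index)
--
--     return fine
-- ===== SOURCE B (Python) =====
-- def min_fee(pages_to_print):
--     # Sort once ascending; the k-th smallest page is paid by all still-waiting people.
--     # (Unlike A, this does not mutate its argument; equivalence is about the return value.)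
--     remaining = len(pages_to_print)
--     fine = 0
--     for v in sorted(pages_to_print):
--         fine += v * remaining
--         remaining -= 1
--     return fine
-- ===== Notes on version B (the rewrite author's own statement) =====
-- stated objective: faster
-- what changed: Replaces the repeated min/index/pop selection loop (quadratic) by one ascending sort followed by a single weighted-sum pass (B also does not mutate its argument).
import Mathlib
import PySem

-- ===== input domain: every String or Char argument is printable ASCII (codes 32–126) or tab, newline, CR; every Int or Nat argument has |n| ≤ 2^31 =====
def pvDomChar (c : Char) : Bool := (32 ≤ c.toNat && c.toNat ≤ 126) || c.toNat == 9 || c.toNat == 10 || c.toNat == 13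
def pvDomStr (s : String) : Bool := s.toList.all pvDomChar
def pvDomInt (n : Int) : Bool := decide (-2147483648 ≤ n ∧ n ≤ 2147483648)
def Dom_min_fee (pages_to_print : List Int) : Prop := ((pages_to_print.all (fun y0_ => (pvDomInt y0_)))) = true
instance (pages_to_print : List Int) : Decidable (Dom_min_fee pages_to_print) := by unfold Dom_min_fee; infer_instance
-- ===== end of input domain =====

-- B replaces A's quadratic min/index/pop selection loop by one sort and a single weighted-sum
-- pass (objective: faster). A empties its argument list in place; B does not mutate it —
-- the equivalence proved here is about the return value.

-- ===== PORT A =====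
-- one iteration of A's `for i in range(len(...))` body, carrying (pages_to_print, fine);
-- the `none` branches are unreachable (the list is nonempty on every iteration) and only totalize
def minFeeGo : Nat → List Int → Int → Int
  | 0, _, fine => fine
  | n + 1, xs, fine =>
    match PySem.List.min? xs (fun x => x) with
    | none => fine
    | some m =>
      match PySem.List.index? xs m with
      | none => fine
      | some idx =>
        match PySem.List.pop? xs (idx : Int) with
        | none => fine
        | some (_, rest) => minFeeGo n rest (fine + m * (xs.length : Int))

def min_fee (pages_to_print : List Int) : Int :=
  minFeeGo pages_to_print.length pages_to_print 0

-- ===== PORT B =====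
-- B's `for v in sorted(...)` loop, carrying (remaining, fine)
def minFeeAltGo : List Int → Int → Int → Int
  | [], _, fine => fine
  | v :: t, remaining, fine => minFeeAltGo t (remaining - 1) (fine + v * remaining)

def min_fee_alt (pages_to_print : List Int) : Int :=
  minFeeAltGo (PySem.List.sorted pages_to_print (fun x => x) false)
    (pages_to_print.length : Int) 0

-- ===== PRECONDITION & SPEC =====
def Spec_min_fee (pages_to_print : List Int) (out : Int) : Prop := out = min_fee_alt pages_to_print
instance (pages_to_print : List Int) (out : Int) : Decidable (Spec_min_fee pages_to_print out) := by unfold Spec_min_fee; infer_instance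

-- ===== CLAIM (what is proved, stated in full; the proofs are below) =====
def Claim_equal_min_fee : Prop := ∀ (pages_to_print : List Int), Dom_min_fee pages_to_print → Spec_min_fee pages_to_print (min_fee pages_to_print)

-- ===== LEMMAS AND PROOFS =====

theorem eraseIdx_first (pre suf : List Int) (m : Int) (h : m ∉ pre) :
    (pre ++ m :: suf).eraseIdx pre.length = (pre ++ m :: suf).erase m := by
  induction pre with
  | nil => simp
  | cons a t ih =>
      simp at h
      simp [List.erase_cons, ih h.2, beq_iff_eq]
      exact fun hma => absurd hma.symm h.1

-- weighted sum of a list: each element times the number of elements from it to the end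
def wsum : List Int → Int
  | [] => 0
  | v :: t => v * ((t.length : Int) + 1) + wsum t

theorem minFeeAltGo_eq_wsum (l : List Int) (fine : Int) :
    minFeeAltGo l (l.length : Int) fine = fine + wsum l := by
  induction l generalizing fine with
  | nil => simp [minFeeAltGo, wsum]
  | cons v t ih =>
      simp only [minFeeAltGo, wsum, List.length_cons]
      have : ((t.length + 1 : Nat) : Int) - 1 = (t.length : Int) := by push_cast; ring
      rw [this, ih]
      push_cast; ring

theorem sorted_cons_erase (xs : List Int) (m : Int) (hm : m ∈ xs)
    (hmin : ∀ y ∈ xs, m ≤ y) :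
    PySem.List.sorted xs (fun x => x) false
      = m :: PySem.List.sorted (xs.erase m) (fun x => x) false := by
  have hperm : (PySem.List.sorted xs (fun x => x) false).Perm
      (m :: PySem.List.sorted (xs.erase m) (fun x => x) false) := by
    refine ((PySem.List.sorted_perm xs (fun x => x) false).trans
      (List.perm_cons_erase hm)).trans ?_
    exact List.Perm.cons m (PySem.List.sorted_perm (xs.erase m) (fun x => x) false).symm
  have hs1 : (PySem.List.sorted xs (fun x => x) false).Pairwise (· ≤ ·) := by
    simpa using PySem.List.sorted_pairwise xs (fun x => x)
  have hs2 : (m :: PySem.List.sorted (xs.erase m) (fun x => x) false).Pairwise (· ≤ ·) := by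
    rw [List.pairwise_cons]
    refine ⟨?_, by simpa using PySem.List.sorted_pairwise (xs.erase m) (fun x => x)⟩
    intro y hy
    exact hmin y (List.mem_of_mem_erase
      ((PySem.List.mem_sorted (xs.erase m) (fun x => x) false y).1 hy))
  exact List.Perm.eq_of_pairwise' hs1 hs2 hperm

theorem minFeeGo_eq : ∀ (n : Nat) (xs : List Int) (fine : Int), xs.length = n →
    minFeeGo n xs fine = fine + wsum (PySem.List.sorted xs (fun x => x) false) := by
  intro n
  induction n with
  | zero =>
      intro xs fine hlen
      have : xs = [] := List.length_eq_zero_iff.1 hlen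
      subst this
      simp [minFeeGo, wsum, PySem.List.sorted]
  | succ n ih =>
      intro xs fine hlen
      have hne : xs ≠ [] := by intro h; subst h; simp at hlen
      obtain ⟨m, hmin⟩ : ∃ m, PySem.List.min? xs (fun x => x) = some m := by
        cases h : PySem.List.min? xs (fun x => x) with
        | none => exact absurd ((PySem.List.min?_eq_none_iff _ _).1 h) hne
        | some m => exact ⟨m, rfl⟩
      have hm_mem : m ∈ xs := PySem.List.min?_mem hmin
      have hm_min : ∀ y ∈ xs, m ≤ y := by
        intro y hy; simpa using PySem.List.min?_isMin hmin y hy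
      obtain ⟨idx, hidx⟩ : ∃ idx, PySem.List.index? xs m = some idx := by
        cases h : PySem.List.index? xs m with
        | none => exact absurd ((PySem.List.index?_eq_none_iff _ _).1 h) (by simp [hm_mem])
        | some idx => exact ⟨idx, rfl⟩
      obtain ⟨pre, suf, hdecomp, hprelen, hnotpre⟩ := (PySem.List.index?_eq_some_iff _ _ _).1 hidx
      obtain ⟨hk, hget, -⟩ := PySem.List.getElem_of_index?_eq_some hidx
      have hpop : PySem.List.pop? xs (idx : Int) = some (xs[idx], xs.eraseIdx idx) :=
        PySem.List.pop?_natCast xs idx hk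
      have herase : xs.eraseIdx idx = xs.erase m := by
        subst hdecomp
        rw [← hprelen]
        exact eraseIdx_first pre suf m hnotpre
      have hrestlen : (xs.eraseIdx idx).length = n := by
        rw [List.length_eraseIdx_of_lt hk]
        omega
      have hstep : minFeeGo (n + 1) xs fine
          = minFeeGo n (xs.eraseIdx idx) (fine + m * (xs.length : Int)) := by
        have hidx2 : List.idxOf? m xs = some idx := by
          simpa [PySem.List.index?_eq_idxOf?] using hidx
        simp [minFeeGo, hmin, hidx2, hpop]
      rw [hstep, ih _ _ hrestlen, herase,
          sorted_cons_erase xs m hm_mem hm_min]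
      have hlen' : ((PySem.List.sorted (xs.erase m) (fun x => x) false).length : Int)
          = (xs.length : Int) - 1 := by
        rw [PySem.List.length_sorted, List.length_erase_of_mem hm_mem]
        omega
      simp only [wsum, hlen']
      ring

-- ===== VERDICT (by name: the statement is the Claim_ definition above) =====
theorem min_fee_spec : Claim_equal_min_fee := by
  intro xs _
  unfold Spec_min_fee min_fee min_fee_alt
  rw [minFeeGo_eq xs.length xs 0 rfl,
      show ((xs.length : Int))
          = ((PySem.List.sorted xs (fun x => x) false).length : Int) by
        rw [PySem.List.length_sorted],
      minFeeAltGo_eq_wsum]
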